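-- pv_equiv track=rewrite | github.com/alantao5056/USACO_Bronze | 2017_february_bronze/crossroad/crossroad.py | getCrossings
-- ===== SOURCE A (Python) =====
-- def getCrossings(cows):
--   cowLog = {}
--   count = 0
--   for i in range(0, len(cows)):
--     cowID = cows[i][0]
--     cowSide = cows[i][1]
--     if cowID not in cowLog:
--       cowLog[cowID] = cowSide
--     elif cowLog[cowID] != cowSide:
--       count += 1
--       cowLog[cowID] = cowSide
--   return count
-- ===== SOURCE B (Python) =====
-- def getCrossings(cows):
--   # group each cow's sides in event order, then count adjacent transitions per group
--   groups = {}
--   for cowID, cowSide in cows: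
--     groups.setdefault(cowID, []).append(cowSide)
--   total = 0
--   for sides in groups.values():
--     for prev, cur in zip(sides, sides[1:]):
--       if prev != cur:
--         total += 1
--   return total
-- ===== Notes on version B (the rewrite author's own statement) =====
-- stated objective: alternative
-- what changed: Replaces the single pass that keeps each cow's last side in a dict and increments on mismatch with a two-phase structure: first group all sides per cowID into lists, then sum the number of adjacent unequal pairs in each group.
import Mathlib
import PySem

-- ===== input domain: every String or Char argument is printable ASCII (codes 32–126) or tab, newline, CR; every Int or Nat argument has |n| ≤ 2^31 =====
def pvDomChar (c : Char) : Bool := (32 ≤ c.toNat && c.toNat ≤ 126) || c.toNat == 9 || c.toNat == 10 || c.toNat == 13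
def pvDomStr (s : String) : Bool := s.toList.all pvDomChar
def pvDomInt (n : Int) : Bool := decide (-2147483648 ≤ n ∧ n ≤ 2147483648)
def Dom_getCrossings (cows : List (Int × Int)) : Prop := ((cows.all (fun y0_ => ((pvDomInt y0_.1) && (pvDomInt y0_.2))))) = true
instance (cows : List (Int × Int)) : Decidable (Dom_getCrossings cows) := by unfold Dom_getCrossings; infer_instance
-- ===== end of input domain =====

-- B groups the sides per cow and counts adjacent transitions per group instead of
-- A's single pass with a running last-side dict; objective: alternative decomposition.

-- ===== PORT A =====
-- one pass; state = (cowLog : last side seen per cow, count)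
def getCrossings (cows : List (Int × Int)) : Int :=
  (cows.foldl
    (fun (st : PySem.Dict Int Int × Int) c =>
      if st.1.contains c.1 = false then (st.1.insert c.1 c.2, st.2)
      else if st.1.getD c.1 0 ≠ c.2 then (st.1.insert c.1 c.2, st.2 + 1)
      else st)
    (PySem.Dict.empty, 0)).2

-- ===== PORT B =====
-- phase 1: groups[cowID] gets cowSide appended ('setdefault(…, []).append(s)' ≡ Dict.modify with default [])
-- phase 2: for each group, count adjacent unequal pairs
def getCrossings_alt (cows : List (Int × Int)) : Int :=
  (cows.foldl (fun d p => d.modify p.1 [] (fun l => l ++ [p.2]))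
      (PySem.Dict.empty : PySem.Dict Int (List Int))).values.foldl
    (fun total sides =>
      (sides.zip sides.tail).foldl (fun t pc => if pc.1 ≠ pc.2 then t + 1 else t) total)
    0

-- ===== PRECONDITION & SPEC =====
def Spec_getCrossings (cows : List (Int × Int)) (out : Int) : Prop := out = getCrossings_alt cows
instance (cows : List (Int × Int)) (out : Int) : Decidable (Spec_getCrossings cows out) := by unfold Spec_getCrossings; infer_instance

-- ===== CLAIM (what is proved, stated in full; the proofs are below) =====
def Claim_equal_getCrossings : Prop := ∀ (cows : List (Int × Int)), Dom_getCrossings cows → Spec_getCrossings cows (getCrossings cows)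

-- ===== LEMMAS AND PROOFS =====

-- A's loop body, named for the proofs
def pvStepA (st : PySem.Dict Int Int × Int) (c : Int × Int) : PySem.Dict Int Int × Int :=
  if st.1.contains c.1 = false then (st.1.insert c.1 c.2, st.2)
  else if st.1.getD c.1 0 ≠ c.2 then (st.1.insert c.1 c.2, st.2 + 1)
  else st

lemma pvA_eq (cows : List (Int × Int)) :
    getCrossings cows = (cows.foldl pvStepA (PySem.Dict.empty, 0)).2 := rfl

-- the sides of cow k, in event order
def pvSides (cows : List (Int × Int)) (k : Int) : List Int :=
  (cows.filter (fun p => p.1 == k)).map (fun x => x.2)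

-- number of adjacent transitions in a side list
def pvTrans : List Int → Int
  | a :: b :: r => (if a ≠ b then 1 else 0) + pvTrans (b :: r)
  | _ => 0

-- contribution of one more event s after a history whose last side is o
def pvStepOf (o : Option Int) (s : Int) : Int :=
  match o with
  | some v => if v ≠ s then 1 else 0
  | none => 0

lemma pvInner_eq (l : List Int) : ∀ t : Int,
    (l.zip l.tail).foldl (fun t pc => if pc.1 ≠ pc.2 then t + 1 else t) t = t + pvTrans l := by
  induction l with
  | nil => intro t; simp [pvTrans]
  | cons a rest ih =>
    intro t
    cases rest with
    | nil => simp [pvTrans]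
    | cons b r =>
      have hz : (a :: b :: r).zip (a :: b :: r).tail = (a, b) :: ((b :: r).zip (b :: r).tail) := by
        simp [List.zip]
      rw [hz, List.foldl_cons, ih]
      simp only [pvTrans]
      split_ifs <;> ring

lemma pvTrans_append (l : List Int) (s : Int) :
    pvTrans (l ++ [s]) = pvTrans l + pvStepOf l.getLast? s := by
  induction l with
  | nil => simp [pvTrans, pvStepOf]
  | cons a rest ih =>
    cases rest with
    | nil =>
      simp only [pvTrans, pvStepOf, List.nil_append, List.cons_append, List.getLast?_singleton]
      split_ifs <;> ring
    | cons b r =>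
      have h1 : pvTrans ((a :: b :: r) ++ [s])
          = (if a ≠ b then 1 else 0) + pvTrans ((b :: r) ++ [s]) := rfl
      rw [h1, ih]
      have h2 : (a :: b :: r).getLast? = (b :: r).getLast? := by simp
      rw [h2]
      simp only [pvTrans]
      ring

lemma pvSum_update {k : Int} (ids : List Int) (hnd : ids.Nodup) (hk : k ∈ ids)
    (f g : Int → Int) (hagree : ∀ j ∈ ids, j ≠ k → g j = f j) (δ : Int) (hδ : g k = f k + δ) :
    (ids.map g).sum = (ids.map f).sum + δ := by
  induction ids with
  | nil => cases hk
  | cons a t ih =>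
    simp only [List.map_cons, List.sum_cons]
    rcases List.nodup_cons.mp hnd with ⟨ha, hndt⟩
    by_cases hak : a = k
    · subst hak
      have hall : ∀ j ∈ t, g j = f j :=
        fun j hj => hagree j (List.mem_cons_of_mem _ hj) (fun h => ha (h ▸ hj))
      rw [List.map_congr_left hall, hδ]; ring
    · rcases List.mem_cons.mp hk with h | hkt
      · exact absurd h.symm hak
      · rw [hagree a List.mem_cons_self hak,
          ih hndt hkt (fun j hj hjk => hagree j (List.mem_cons_of_mem _ hj) hjk)]
        ring

lemma pvSides_of_not_mem (cows : List (Int × Int)) (k : Int) (h : k ∉ cows.map Prod.fst) :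
    pvSides cows k = [] := by
  unfold pvSides
  rw [List.filter_eq_nil_iff.mpr, List.map_nil]
  intro p hp hpk
  exact h (List.mem_map.mpr ⟨p, hp, by simpa using hpk⟩)

lemma pvSides_append (cows : List (Int × Int)) (c : Int × Int) (k : Int) :
    pvSides (cows ++ [c]) k = pvSides cows k ++ (if c.1 = k then [c.2] else []) := by
  unfold pvSides
  rw [List.filter_append, List.map_append]
  congr 1
  by_cases h : c.1 = k
  · have hb : (c.1 == k) = true := by simpa using h
    simp [List.filter, h]
  · have hb : (c.1 == k) = false := by simpa using h
    simp [List.filter, hb, h]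

lemma pvSides_ne_nil (cows : List (Int × Int)) (k : Int) (h : k ∈ cows.map Prod.fst) :
    pvSides cows k ≠ [] := by
  rcases List.mem_map.mp h with ⟨p, hp, hpk⟩
  unfold pvSides
  simp only [ne_eq, List.map_eq_nil_iff, List.filter_eq_nil_iff]
  intro hall
  exact absurd (by simpa using hpk) (by simpa using hall p hp)

-- B as a closed expression: sum over distinct cowIDs of the transitions of that cow's sides
lemma pvAlt_eq (cows : List (Int × Int)) :
    getCrossings_alt cows
      = ((PySem.Set.ofList (cows.map Prod.fst)).map (fun k => pvTrans (pvSides cows k))).sum := by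
  unfold getCrossings_alt
  have hkeys : (cows.foldl (fun d p => d.modify p.1 [] (fun l => l ++ [p.2]))
      (PySem.Dict.empty : PySem.Dict Int (List Int))).keys = PySem.Set.ofList (cows.map Prod.fst) := by
    rw [PySem.Dict.keys_foldl_modify_key cows (fun p => p.1) [] (fun _ p l => l ++ [p.2])]
    simp [PySem.Dict.keys_empty, PySem.Set.update, PySem.Set.ofList_eq_foldl]
  have hnd : (cows.foldl (fun d p => d.modify p.1 [] (fun l => l ++ [p.2]))
      (PySem.Dict.empty : PySem.Dict Int (List Int))).keys.Nodup :=
    PySem.Dict.nodup_keys_foldl_modify_key cows (fun p => p.1) [] (fun _ p l => l ++ [p.2]) _ (by simp)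
  rw [PySem.Dict.values_eq_map_keys _ hnd []]
  have hfold : ∀ (l : List (List Int)) (a : Int),
      l.foldl (fun total sides =>
        (sides.zip sides.tail).foldl (fun t pc => if pc.1 ≠ pc.2 then t + 1 else t) total) a
      = l.foldl (fun total sides => total + pvTrans sides) a := by
    intro l a
    apply PySem.List.foldl_congr_mem
    intro acc x _
    exact pvInner_eq x acc
  rw [hfold, PySem.List.foldl_add, hkeys, List.map_map]
  have hcongr : ∀ k ∈ PySem.Set.ofList (cows.map Prod.fst),
      (pvTrans ∘ fun k => (cows.foldl (fun d p => d.modify p.1 [] (fun l => l ++ [p.2]))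
        (PySem.Dict.empty : PySem.Dict Int (List Int))).getD k []) k
      = (fun k => pvTrans (pvSides cows k)) k := by
    intro k _
    simp only [Function.comp]
    rw [PySem.Dict.getD_foldl_modify_append, PySem.Dict.getD_empty]
    rfl
  rw [List.map_congr_left hcongr]
  ring

-- main invariant: the one-pass fold's count equals the grouped transition sum, and its
-- cowLog maps each id to the last side of that id's group
lemma pvMain (cows : List (Int × Int)) :
    (cows.foldl pvStepA (PySem.Dict.empty, 0)).2
      = ((PySem.Set.ofList (cows.map Prod.fst)).map (fun k => pvTrans (pvSides cows k))).sum
    ∧ ∀ k, (cows.foldl pvStepA (PySem.Dict.empty, 0)).1.get? k = (pvSides cows k).getLast? := by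
  induction cows using List.reverseRecOn with
  | nil =>
    constructor
    · simp [pvSides, pvTrans, PySem.Set.ofList]
    · intro k; simp [pvSides, PySem.Dict.get?_empty]
  | append_singleton cows c ih =>
    obtain ⟨ihc, ihl⟩ := ih
    rw [List.foldl_append, List.foldl_cons, List.foldl_nil, List.map_append]
    simp only [List.map_cons, List.map_nil]
    have hof : PySem.Set.ofList (cows.map Prod.fst ++ [c.1])
        = PySem.Set.add (PySem.Set.ofList (cows.map Prod.fst)) c.1 := by
      simp [PySem.Set.ofList_eq_foldl, List.foldl_append]
    rw [hof]
    set st := cows.foldl pvStepA (PySem.Dict.empty, 0) with hst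
    by_cases hmem : c.1 ∈ cows.map Prod.fst
    · -- cow seen before: group for c.1 is nonempty, its last side is what cowLog stores
      have hne := pvSides_ne_nil cows c.1 hmem
      obtain ⟨v, hv⟩ : ∃ v, (pvSides cows c.1).getLast? = some v := by
        cases h : (pvSides cows c.1).getLast? with
        | none => exact absurd (List.getLast?_eq_none_iff.mp h) hne
        | some v => exact ⟨v, rfl⟩
      have hget : st.1.get? c.1 = some v := by rw [ihl, hv]
      have hcont : st.1.contains c.1 = true := by
        rw [PySem.Dict.contains_eq_isSome_get?, hget]; rfl
      have hgetD : st.1.getD c.1 0 = v := PySem.Dict.getD_of_get?_eq_some _ _ hget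
      have hadd : PySem.Set.add (PySem.Set.ofList (cows.map Prod.fst)) c.1
          = PySem.Set.ofList (cows.map Prod.fst) := by
        have hc : PySem.Set.contains (PySem.Set.ofList (cows.map Prod.fst)) c.1 = true := by
          simp only [PySem.Set.contains]
          simp
          obtain ⟨p, hp, hpe⟩ := List.mem_map.mp hmem
          exact ⟨p.2, by rw [← hpe]; simpa using hp⟩
        simp only [PySem.Set.add, hc]
        simp
      rw [hadd]
      have hsum : ((PySem.Set.ofList (cows.map Prod.fst)).map
            (fun k => pvTrans (pvSides (cows ++ [c]) k))).sum
          = ((PySem.Set.ofList (cows.map Prod.fst)).map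
            (fun k => pvTrans (pvSides cows k))).sum + pvStepOf (some v) c.2 := by
        apply pvSum_update (k := c.1) _ (PySem.Set.nodup_ofList _)
          ((PySem.Set.mem_ofList _ _).mpr hmem)
        · intro j _ hj
          rw [pvSides_append, if_neg (fun h => hj h.symm), List.append_nil]
        · rw [pvSides_append, if_pos rfl, pvTrans_append, hv]
      by_cases hvs : v = c.2
      · -- same side: A takes the else branch, nothing changes
        have hstep : pvStepA st c = st := by
          simp [pvStepA, hcont, hgetD, hvs]
        rw [hstep]
        constructor
        · rw [hsum, ihc]
          simp [pvStepOf, hvs]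
        · intro k
          rw [ihl, pvSides_append]
          by_cases hk : c.1 = k
          · rw [if_pos hk, List.getLast?_concat, ← hk, hv, hvs]
          · rw [if_neg hk, List.append_nil]
      · -- side changed: count += 1 and cowLog is updated
        have hstep : pvStepA st c = (st.1.insert c.1 c.2, st.2 + 1) := by
          simp [pvStepA, hcont, hgetD, hvs]
        rw [hstep]
        constructor
        · rw [hsum, ihc]
          simp [pvStepOf, hvs]
        · intro k
          rw [PySem.Dict.get?_insert, pvSides_append]
          by_cases hk : k = c.1
          · rw [if_pos hk, if_pos hk.symm, List.getLast?_concat]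
          · rw [if_neg hk, if_neg (fun h => hk h.symm), List.append_nil, ihl]
    · -- new cow: its group was empty; a singleton group has no transitions
      have hsides0 : pvSides cows c.1 = [] := pvSides_of_not_mem cows c.1 hmem
      have hget : st.1.get? c.1 = none := by rw [ihl, hsides0]; rfl
      have hcont : st.1.contains c.1 = false := by
        rw [PySem.Dict.contains_eq_isSome_get?, hget]; rfl
      have hstep : pvStepA st c = (st.1.insert c.1 c.2, st.2) := by
        simp [pvStepA, hcont]
      rw [hstep]
      have hadd : PySem.Set.add (PySem.Set.ofList (cows.map Prod.fst)) c.1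
          = PySem.Set.ofList (cows.map Prod.fst) ++ [c.1] := by
        have hc : PySem.Set.contains (PySem.Set.ofList (cows.map Prod.fst)) c.1 = false := by
          simp only [PySem.Set.contains]
          simp
          intro x hx
          exact hmem (List.mem_map.mpr ⟨(c.1, x), hx, rfl⟩)
        simp only [PySem.Set.add, hc]
        simp
      rw [hadd]
      constructor
      · rw [List.map_append, List.sum_append]
        have h0 : ((fun k => pvTrans (pvSides (cows ++ [c]) k)) c.1) = 0 := by
          simp only [pvSides_append, hsides0, List.nil_append]
          rfl
        have hcongr : ∀ j ∈ PySem.Set.ofList (cows.map Prod.fst),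
            (fun k => pvTrans (pvSides (cows ++ [c]) k)) j
            = (fun k => pvTrans (pvSides cows k)) j := by
          intro j hj
          have hjne : c.1 ≠ j := by
            intro h
            exact hmem (h ▸ (PySem.Set.mem_ofList _ _).mp hj)
          simp only
          rw [pvSides_append, if_neg hjne, List.append_nil]
        rw [List.map_congr_left hcongr, ihc]
        simp [h0]
      · intro k
        rw [PySem.Dict.get?_insert, pvSides_append]
        by_cases hk : k = c.1
        · rw [if_pos hk, if_pos hk.symm, hk, hsides0, List.nil_append, List.getLast?_singleton]
        · rw [if_neg hk, if_neg (fun h => hk h.symm), List.append_nil, ihl]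

-- ===== VERDICT (by name: the statement is the Claim_ definition above) =====
theorem getCrossings_spec : Claim_equal_getCrossings := by
  intro cows _
  unfold Spec_getCrossings
  rw [pvA_eq, pvAlt_eq, (pvMain cows).1]
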